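-- pv_equiv track=rewrite | github.com/KFoxder/jane_street_puzzle | altered_states_2/main.py | get_available_start_cells
-- ===== SOURCE A (Python) =====
-- def get_available_start_cells(matrix, letter):
--     same_letter_cells = []
--     empty_cells = []
--     for row in range(len(matrix)):
--         for col in range(len(matrix[0])):
--             if matrix[row][col] is None:
--                 empty_cells.append((row, col))
--             elif matrix[row][col] == letter:
--                 same_letter_cells.append((row, col))
--     return same_letter_cells + empty_cells
-- ===== SOURCE B (Python) =====
-- def get_available_start_cells(matrix, letter):
--     if not matrix:
--         return []
--     w = len(matrix[0])
--     tagged = sorted(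
--         ((0 if row[c] == letter else 1, r, c)
--          for r, row in enumerate(matrix)
--          for c in range(w)
--          if row[c] is None or row[c] == letter),
--         key=lambda t: t[0],
--     )
--     return [(r, c) for _, r, c in tagged]
-- ===== Notes on version B (the rewrite author's own statement) =====
-- stated objective: alternative
-- what changed: Instead of A's two growing accumulators concatenated at the end, B collects one tagged stream of candidate cells (tag 0 = same letter, tag 1 = empty) and obtains the final order by a stable sort on the tag (partition-via-stable-sort), then strips the tags.
import Mathlib
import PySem

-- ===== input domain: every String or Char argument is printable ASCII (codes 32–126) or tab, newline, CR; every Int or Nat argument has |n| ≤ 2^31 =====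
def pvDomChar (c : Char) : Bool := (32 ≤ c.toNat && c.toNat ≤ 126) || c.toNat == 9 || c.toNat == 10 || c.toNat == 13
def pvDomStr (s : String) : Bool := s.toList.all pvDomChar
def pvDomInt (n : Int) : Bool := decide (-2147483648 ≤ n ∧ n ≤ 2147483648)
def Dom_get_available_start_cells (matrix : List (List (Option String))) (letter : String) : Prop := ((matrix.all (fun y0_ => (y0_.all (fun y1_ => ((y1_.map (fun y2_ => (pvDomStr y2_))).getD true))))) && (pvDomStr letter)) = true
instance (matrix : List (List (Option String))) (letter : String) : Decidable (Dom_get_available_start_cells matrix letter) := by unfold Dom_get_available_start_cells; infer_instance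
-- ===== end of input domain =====

-- B replaces A's two growing accumulators with one tagged candidate stream ordered by a stable sort on the tag (partition via stable sort); alternative decomposition, same cost.

-- ===== PORT A =====
-- single pass over index ranges, appending into a pair of accumulators, then concatenating them
def get_available_start_cells (matrix : List (List (Option String))) (letter : String) : List (Int × Int) :=
  let p := (PySem.List.pyRange 0 matrix.length 1).foldl
    (fun (st : List (Int × Int) × List (Int × Int)) row =>
      (PySem.List.pyRange 0 ((PySem.List.pyGetD matrix 0 []).length : Int) 1).foldl
        (fun (st : List (Int × Int) × List (Int × Int)) col =>
          match PySem.List.pyGetD (PySem.List.pyGetD matrix row []) col none with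
          | none => (st.1, st.2 ++ [(row, col)])
          | some v => if v == letter then (st.1 ++ [(row, col)], st.2) else st)
        st)
    (([] : List (Int × Int)), ([] : List (Int × Int)))
  p.1 ++ p.2

-- ===== PORT B =====
-- one tagged stream of candidate cells, stable-sorted by tag (0 = same letter, 1 = empty), then tags stripped
def get_available_start_cells_alt (matrix : List (List (Option String))) (letter : String) : List (Int × Int) :=
  match matrix with
  | [] => []
  | first :: _ =>
    let w : Int := first.length
    let tagged := PySem.List.sorted
      ((PySem.List.enumerate matrix 0).flatMap (fun p =>
        (PySem.List.pyRange 0 w 1).filterMap (fun c =>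
          match PySem.List.pyGetD p.2 c none with
          | none => some ((1 : Int), p.1, c)
          | some v => if v == letter then some ((0 : Int), p.1, c) else none)))
      (fun t => t.1) false
    tagged.map (fun t => t.2)

-- ===== PRECONDITION & SPEC =====
-- Pre_ excludes ragged matrices with a row shorter than row 0, on which A raises IndexError (B raises there too).
def Pre_get_available_start_cells (matrix : List (List (Option String))) (letter : String) : Prop :=
  ∀ row ∈ matrix, (matrix.headD []).length ≤ row.length

instance (matrix : List (List (Option String))) (letter : String) : Decidable (Pre_get_available_start_cells matrix letter) := by unfold Pre_get_available_start_cells; infer_instance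

def pvWitness_get_available_start_cells : List (List (Option String)) × String :=
  ([[some "a", none], [none, some "b"]], "a")

def Spec_get_available_start_cells (matrix : List (List (Option String))) (letter : String) (out : List (Int × Int)) : Prop := out = get_available_start_cells_alt matrix letter
instance (matrix : List (List (Option String))) (letter : String) (out : List (Int × Int)) : Decidable (Spec_get_available_start_cells matrix letter out) := by unfold Spec_get_available_start_cells; infer_instance

-- ===== CLAIM (what is proved, stated in full; the proofs are below) =====
def Claim_equal_get_available_start_cells : Prop := ∀ (matrix : List (List (Option String))) (letter : String), Dom_get_available_start_cells matrix letter → Pre_get_available_start_cells matrix letter → Spec_get_available_start_cells matrix letter (get_available_start_cells matrix letter)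

-- ===== LEMMAS AND PROOFS =====

-- selectors shared by the proof (NOT by the ports)
def pvSame (letter : String) (rw : List (Option String)) (r : Int) (w : Int) : List (Int × Int) :=
  (PySem.List.pyRange 0 w 1).filterMap (fun c =>
    match PySem.List.pyGetD rw c none with
    | some v => if v == letter then some (r, c) else none
    | none => none)

def pvEmpty (rw : List (Option String)) (r : Int) (w : Int) : List (Int × Int) :=
  (PySem.List.pyRange 0 w 1).filterMap (fun c =>
    match PySem.List.pyGetD rw c none with
    | none => some (r, c)
    | some _ => none)

-- inner loop of A, characterised on an arbitrary column list
theorem pv_inner (letter : String) (rw : List (Option String)) (r : Int)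
    (L : List Int) (s e : List (Int × Int)) :
    L.foldl (fun (st : List (Int × Int) × List (Int × Int)) col =>
        match PySem.List.pyGetD rw col none with
        | none => (st.1, st.2 ++ [(r, col)])
        | some v => if v == letter then (st.1 ++ [(r, col)], st.2) else st) (s, e)
      = (s ++ L.filterMap (fun c =>
            match PySem.List.pyGetD rw c none with
            | some v => if v == letter then some (r, c) else none
            | none => none),
         e ++ L.filterMap (fun c =>
            match PySem.List.pyGetD rw c none with
            | none => some (r, c)
            | some _ => none)) := by
  induction L generalizing s e with
  | nil => simp
  | cons c L ih =>
    rw [List.foldl_cons, List.filterMap_cons, List.filterMap_cons]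
    cases h : PySem.List.pyGetD rw c none with
    | none =>
      simp only [h]
      rw [ih]
      simp
    | some v =>
      simp only [h]
      cases hv : (v == letter) with
      | true =>
        simp only [if_pos rfl]
        rw [ih]
        simp
      | false =>
        simp only [Bool.false_eq_true, if_false]
        rw [ih]

-- outer loop of A, characterised on an arbitrary row-index list
theorem pv_outer (matrix : List (List (Option String))) (letter : String) (w : Int)
    (L : List Int) (s e : List (Int × Int)) :
    L.foldl (fun (st : List (Int × Int) × List (Int × Int)) row =>
        (PySem.List.pyRange 0 w 1).foldl
          (fun (st : List (Int × Int) × List (Int × Int)) col =>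
            match PySem.List.pyGetD (PySem.List.pyGetD matrix row []) col none with
            | none => (st.1, st.2 ++ [(row, col)])
            | some v => if v == letter then (st.1 ++ [(row, col)], st.2) else st)
          st) (s, e)
      = (s ++ L.flatMap (fun r => pvSame letter (PySem.List.pyGetD matrix r []) r w),
         e ++ L.flatMap (fun r => pvEmpty (PySem.List.pyGetD matrix r []) r w)) := by
  induction L generalizing s e with
  | nil => simp
  | cons r L ih =>
    simp only [List.foldl_cons, List.flatMap_cons]
    rw [pv_inner letter (PySem.List.pyGetD matrix r []) r (PySem.List.pyRange 0 w 1) s e, ih]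
    simp [pvSame, pvEmpty]

-- insertBy skips a prefix it is not inserted into
theorem pv_insertBy_append_left {α : Type} (before : α → α → Bool) (x : α) (A B : List α)
    (hA : ∀ a ∈ A, before x a = false) :
    PySem.List.insertBy before x (A ++ B) = A ++ PySem.List.insertBy before x B := by
  induction A with
  | nil => simp
  | cons a A ih =>
    simp only [List.cons_append, PySem.List.insertBy, hA a (by simp)]
    simp only [Bool.false_eq_true, if_false, List.cons_append]
    rw [ih (fun a ha => hA a (by simp [ha]))]

-- stable sort on a 0/1 tag is the stable partition
theorem pv_sorted_tag01 {α : Type} (xs : List ((Int × α))) 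
    (h : ∀ x ∈ xs, x.1 = 0 ∨ x.1 = 1) :
    PySem.List.sorted xs (fun t => t.1) false
      = xs.filter (fun t => t.1 == 0) ++ xs.filter (fun t => t.1 == 1) := by
  induction xs using List.reverseRecOn with
  | nil => simp [PySem.List.sorted]
  | append_singleton xs x ih =>
    have hxs : ∀ y ∈ xs, y.1 = 0 ∨ y.1 = 1 := fun y hy => h y (by simp [hy])
    rw [PySem.List.sorted_eq_foldl_insertBy, List.foldl_append, List.foldl_cons, List.foldl_nil,
        ← PySem.List.sorted_eq_foldl_insertBy, ih hxs]
    rcases h x (by simp) with hx | hx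
    · rw [pv_insertBy_append_left _ x _ _ (by
        intro a ha
        have := (List.mem_filter.mp ha).2
        simp only [beq_iff_eq] at this
        simp [hx, this])]
      have hins : PySem.List.insertBy (fun a b => decide ((fun t => t.1) a < (fun t => t.1) b)) x
          (xs.filter (fun t => t.1 == 1)) = x :: xs.filter (fun t => t.1 == 1) := by
        cases hB : xs.filter (fun t : Int × α => t.1 == 1) with
        | nil => simp [PySem.List.insertBy]
        | cons b B =>
          have hb : b.1 = 1 := by
            have : b ∈ xs.filter (fun t : Int × α => t.1 == 1) := by rw [hB]; simp
            simpa using (List.mem_filter.mp this).2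
          simp [PySem.List.insertBy, hx, hb]
      rw [hins]
      simp [List.filter_append, hx]
    · rw [PySem.List.insertBy_of_forall_not_before _ x _ (by
        intro y hy
        rcases List.mem_append.mp hy with hy | hy
        · have := (List.mem_filter.mp hy).2
          simp only [beq_iff_eq] at this
          simp [hx, this]
        · have := (List.mem_filter.mp hy).2
          simp only [beq_iff_eq] at this
          simp [hx, this])]
      simp [List.filter_append, hx]

-- ===== VERDICT (by name: the statement is the Claim_ definition above) =====
theorem get_available_start_cells_spec : Claim_equal_get_available_start_cells := by
  intro matrix letter _ _
  unfold Spec_get_available_start_cells get_available_start_cells get_available_start_cells_alt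
  cases matrix with
  | nil => simp
  | cons first rest =>
    simp only
    rw [PySem.List.pyGetD_zero_cons]
    rw [pv_outer (first :: rest) letter (first.length : Int)
        (PySem.List.pyRange 0 ((first :: rest).length : Int) 1) [] []]
    rw [pv_sorted_tag01 _ (by
      intro x hx
      rcases List.mem_flatMap.mp hx with ⟨p, _, hx⟩
      rcases List.mem_filterMap.mp hx with ⟨c, _, hx⟩
      revert hx
      cases PySem.List.pyGetD p.2 c none with
      | none => intro hx; right; cases hx; rfl
      | some v =>
        by_cases hv : (v == letter) = true
        · simp only [hv, if_true]; intro hx; left; cases hx; rfl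
        · simp [hv])]
    rw [List.map_append]
    congr 1
    · rw [List.filter_flatMap, List.map_flatMap,
          PySem.List.enumerate_eq_map_pyRange (d := ([] : List (Option String))), List.flatMap_map]
      simp only [List.nil_append]
      apply List.flatMap_congr
      intro r _
      rw [List.filter_filterMap, List.map_filterMap, pvSame]
      apply List.filterMap_congr
      intro c _
      cases PySem.List.pyGetD (PySem.List.pyGetD (first :: rest) r []) c none with
      | none => simp
      | some v =>
        by_cases hv : (v == letter) = true
        · simp [hv]
        · simp [hv]
    · rw [List.filter_flatMap, List.map_flatMap,
          PySem.List.enumerate_eq_map_pyRange (d := ([] : List (Option String))), List.flatMap_map]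
      simp only [List.nil_append]
      apply List.flatMap_congr
      intro r _
      rw [List.filter_filterMap, List.map_filterMap, pvEmpty]
      apply List.filterMap_congr
      intro c _
      cases PySem.List.pyGetD (PySem.List.pyGetD (first :: rest) r []) c none with
      | none => simp
      | some v =>
        by_cases hv : (v == letter) = true
        · simp [hv]
        · simp [hv]
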